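-- pv_equiv track=rewrite | github.com/janael-pinheiro/hacker_hank_solutions | hacker_hank/happy_lady_bug.py | compute_count
-- ===== SOURCE A (Python) =====
-- def compute_count(b: str):
--     has_empty_space = False
--     count_lady_bug = {}
--     color_index = {}
--     for index, letter in enumerate(b):
--         if letter == "_":
--             has_empty_space = True
--             continue
--         count = count_lady_bug.get(letter, 0)
--         count_lady_bug[letter] = count + 1
--         color = color_index.get(letter, [])
--         color.append(index)
--         color_index[letter] = color
--
--     return count_lady_bug, color_index, has_empty_space
-- ===== SOURCE B (Python) =====
-- def compute_count(b: str):
--     # stage 1: the distinct non-underscore letters, in first-occurrence order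
--     letters = []
--     for ch in b:
--         if ch != "_" and ch not in letters:
--             letters.append(ch)
--     # stage 2: one comprehension per result, scanning b per letter
--     color_index = {ch: [i for i, c in enumerate(b) if c == ch] for ch in letters}
--     count_lady_bug = {ch: sum(1 for c in b if c == ch) for ch in letters}
--     return count_lady_bug, color_index, "_" in b
-- ===== Notes on version B (the rewrite author's own statement) =====
-- stated objective: alternative
-- what changed: B replaces A's single pass that updates two dicts in lockstep by a staged algorithm: first collect the distinct non-underscore letters in first-occurrence order, then build each dict with one comprehension that scans the string per letter (index comprehension / sum of matches), and get the flag from a substring membership test.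
import Mathlib
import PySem

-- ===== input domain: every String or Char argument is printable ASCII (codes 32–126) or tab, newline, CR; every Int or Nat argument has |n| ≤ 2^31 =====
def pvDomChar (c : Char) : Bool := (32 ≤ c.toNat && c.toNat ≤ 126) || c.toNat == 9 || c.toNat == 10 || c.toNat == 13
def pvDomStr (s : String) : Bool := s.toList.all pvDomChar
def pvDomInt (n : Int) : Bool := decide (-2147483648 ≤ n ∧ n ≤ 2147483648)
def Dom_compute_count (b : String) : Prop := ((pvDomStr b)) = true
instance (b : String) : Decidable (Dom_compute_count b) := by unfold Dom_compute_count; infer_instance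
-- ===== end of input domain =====

-- B is a staged alternative: first the distinct non-underscore letters in first-occurrence
-- order, then each dict is built by a per-letter scan of the string (objective: alternative).

-- the 1-char string a Python iteration over a str yields (shared by both ports)
def ccS (c : Char) : String := String.ofList [c]

-- ===== PORT A =====
-- A's loop body: state = (count_lady_bug, color_index, has_empty_space)
def computeCountStepA (st : PySem.Dict String Int × PySem.Dict String (List Int) × Bool)
    (p : Int × Char) : PySem.Dict String Int × PySem.Dict String (List Int) × Bool :=
  if p.2 == '_' then (st.1, st.2.1, true)
  else
    let letter := ccS p.2
    let count := st.1.getD letter 0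
    let cd := st.1.insert letter (count + 1)
    let color := st.2.1.getD letter []
    let ci := st.2.1.insert letter (color ++ [p.1])
    (cd, ci, st.2.2)

def compute_count (b : String) : (List (String × Int)) × (List (String × List Int)) × Bool :=
  let st := (PySem.List.enumerate b.toList 0).foldl computeCountStepA
    ((PySem.Dict.empty : PySem.Dict String Int), (PySem.Dict.empty : PySem.Dict String (List Int)), false)
  (st.1.items, st.2.1.items, st.2.2)

-- ===== PORT B =====
-- stage 1: 'letters' loop — append each non-'_' char not seen before
def ccLetters (cs : List Char) : List Char :=
  cs.foldl (fun ks c => if c != '_' && !ks.contains c then ks ++ [c] else ks) []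

def compute_count_alt (b : String) : (List (String × Int)) × (List (String × List Int)) × Bool :=
  let letters := ccLetters b.toList
  -- {ch: [i for i, c in enumerate(b) if c == ch] for ch in letters}
  let color_index := letters.foldl
    (fun d c => d.insert (ccS c) (((PySem.List.enumerate b.toList 0).filter (fun p => p.2 == c)).map (·.1)))
    (PySem.Dict.empty : PySem.Dict String (List Int))
  -- {ch: sum(1 for c in b if c == ch) for ch in letters}
  let count_lady_bug := letters.foldl
    (fun d c => d.insert (ccS c) (b.toList.foldl (fun acc x => if x == c then acc + 1 else acc) (0 : Int)))
    (PySem.Dict.empty : PySem.Dict String Int)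
  (count_lady_bug.items, color_index.items, PySem.Str.isIn "_" b)

-- ===== PRECONDITION & SPEC =====
def Spec_compute_count (b : String) (out : (List (String × Int)) × (List (String × List Int)) × Bool) : Prop := out = compute_count_alt b
instance (b : String) (out : (List (String × Int)) × (List (String × List Int)) × Bool) : Decidable (Spec_compute_count b out) := by unfold Spec_compute_count; infer_instance

-- ===== CLAIM (what is proved, stated in full; the proofs are below) =====
def Claim_equal_compute_count : Prop := ∀ (b : String), Dom_compute_count b → Spec_compute_count b (compute_count b)

-- ===== LEMMAS AND PROOFS =====

theorem ccS_inj {c1 c2 : Char} (h : ccS c1 = ccS c2) : c1 = c2 := by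
  have := congrArg String.toList h
  simpa [ccS] using this

theorem mem_ccLetters_aux (cs : List Char) (acc : List Char) (x : Char) :
    x ∈ cs.foldl (fun ks c => if c != '_' && !ks.contains c then ks ++ [c] else ks) acc ↔
      x ∈ acc ∨ (x ∈ cs ∧ x ≠ '_') := by
  induction cs generalizing acc with
  | nil => simp
  | cons c t ih =>
    rw [List.foldl_cons, ih]
    split_ifs with h
    · simp only [Bool.and_eq_true, bne_iff_ne, ne_eq, Bool.not_eq_true',
        List.contains_eq_mem, decide_eq_false_iff_not] at h
      obtain ⟨hc, _⟩ := h
      simp only [List.mem_append, List.mem_cons, List.not_mem_nil, or_false, ne_eq]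
      constructor
      · rintro (⟨h1 | h1⟩ | ⟨h1, h2⟩)
        exacts [Or.inl h1, Or.inr ⟨Or.inl h1, h1 ▸ hc⟩, Or.inr ⟨Or.inr h1, h2⟩]
      · rintro (h1 | ⟨h1 | h1, h2⟩)
        exacts [Or.inl (Or.inl h1), Or.inl (Or.inr h1), Or.inr ⟨h1, h2⟩]
    · simp only [Bool.and_eq_true, bne_iff_ne, ne_eq, Bool.not_eq_true',
        List.contains_eq_mem, decide_eq_false_iff_not, not_and_or, not_not] at h
      simp only [List.mem_cons, ne_eq]
      constructor
      · rintro (h1 | ⟨h1, h2⟩); exacts [Or.inl h1, Or.inr ⟨Or.inr h1, h2⟩]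
      · rintro (h1 | ⟨h1 | h1, h2⟩)
        · exact Or.inl h1
        · subst h1
          rcases h with h | h
          · exact absurd h h2
          · exact Or.inl h
        · exact Or.inr ⟨h1, h2⟩

theorem mem_ccLetters (cs : List Char) (x : Char) :
    x ∈ ccLetters cs ↔ x ∈ cs ∧ x ≠ '_' := by
  rw [ccLetters, mem_ccLetters_aux]; simp

theorem nodup_ccLetters_aux (cs : List Char) (acc : List Char) (h : acc.Nodup) :
    (cs.foldl (fun ks c => if c != '_' && !ks.contains c then ks ++ [c] else ks) acc).Nodup := by
  induction cs generalizing acc with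
  | nil => simpa
  | cons c t ih =>
    simp only [List.foldl_cons]
    by_cases hcond : (c != '_' && !acc.contains c) = true
    · rw [if_pos hcond]
      refine ih _ ?_
      have hm : c ∉ acc := by
        simp only [Bool.and_eq_true, Bool.not_eq_true', List.contains_eq_mem,
          decide_eq_false_iff_not] at hcond
        exact hcond.2
      simp_all [List.nodup_append]
      exact fun a ha he => hm (he ▸ ha)
    · rw [if_neg hcond]; exact ih acc h

theorem nodup_ccLetters (cs : List Char) : (ccLetters cs).Nodup :=
  nodup_ccLetters_aux cs [] List.nodup_nil

theorem ccLetters_append (cs : List Char) (c : Char) :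
    ccLetters (cs ++ [c]) =
      if c != '_' && !(ccLetters cs).contains c then ccLetters cs ++ [c] else ccLetters cs := by
  simp [ccLetters, List.foldl_append]

-- keys which A's dicts hold after processing the pairs l, in insertion order
def ccKeys (l : List (Int × Char)) : List Char := ccLetters (l.map (·.2))

theorem keys_mk_map {α : Type} (ks : List Char) (v : Char → α) :
    (PySem.Dict.mk (ks.map (fun c => (ccS c, v c)))).keys = ks.map ccS := by
  simp [PySem.Dict.keys, List.map_map]

theorem contains_mk_map {α : Type} (ks : List Char) (v : Char → α) (c0 : Char) :
    (PySem.Dict.mk (ks.map (fun c => (ccS c, v c)))).contains (ccS c0) = decide (c0 ∈ ks) := by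
  rw [PySem.Dict.contains_eq_decide_mem_keys, keys_mk_map, decide_eq_decide]
  exact List.mem_map_of_injective (fun _ _ => ccS_inj)

theorem nodup_keys_mk_map {α : Type} (ks : List Char) (hnd : ks.Nodup) (v : Char → α) :
    (PySem.Dict.mk (ks.map (fun c => (ccS c, v c)))).keys.Nodup := by
  rw [keys_mk_map]
  exact hnd.map (fun _ _ => ccS_inj)

theorem getD_mk_map {α : Type} (ks : List Char) (hnd : ks.Nodup) (v : Char → α)
    (c0 : Char) (h : c0 ∈ ks) (d0 : α) :
    (PySem.Dict.mk (ks.map (fun c => (ccS c, v c)))).getD (ccS c0) d0 = v c0 :=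
  PySem.Dict.getD_of_mem_items (PySem.Dict.mk (ks.map (fun c => (ccS c, v c))))
    (List.mem_map.mpr ⟨c0, h, rfl⟩) (nodup_keys_mk_map ks hnd v) d0

-- the state of A's loop after processing the pairs l, described key by key
theorem ccA_inv (l : List (Int × Char)) :
    (l.foldl computeCountStepA
        ((PySem.Dict.empty : PySem.Dict String Int), (PySem.Dict.empty : PySem.Dict String (List Int)), false)) =
      (PySem.Dict.mk ((ccKeys l).map (fun c => (ccS c, ((l.map (·.2)).count c : Int)))),
       PySem.Dict.mk ((ccKeys l).map (fun c => (ccS c, (l.filter (fun p => p.2 == c)).map (·.1)))),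
       l.any (fun p => p.2 == '_')) := by
  induction l using List.reverseRecOn with
  | nil => rfl
  | append_singleton l p ih =>
    rw [List.foldl_append, List.foldl_cons, List.foldl_nil, ih]
    have hkeys : ccKeys (l ++ [p]) =
        if p.2 != '_' && !(ccKeys l).contains p.2 then ccKeys l ++ [p.2] else ccKeys l := by
      simp only [ccKeys, List.map_append, List.map_cons, List.map_nil, ccLetters_append]
    have hnd : (ccKeys l).Nodup := by
      show (ccLetters _).Nodup
      exact nodup_ccLetters _
    by_cases hu : p.2 = '_'
    · -- underscore: both dicts unchanged, flag set
      have hstep : computeCountStepA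
          (PySem.Dict.mk ((ccKeys l).map (fun c => (ccS c, ((l.map (·.2)).count c : Int)))),
           PySem.Dict.mk ((ccKeys l).map (fun c => (ccS c, (l.filter (fun p => p.2 == c)).map (·.1)))),
           l.any (fun p => p.2 == '_')) p =
          (PySem.Dict.mk ((ccKeys l).map (fun c => (ccS c, ((l.map (·.2)).count c : Int)))),
           PySem.Dict.mk ((ccKeys l).map (fun c => (ccS c, (l.filter (fun p => p.2 == c)).map (·.1)))),
           true) := by
        simp [computeCountStepA, hu]
      rw [hstep]
      have hk : ccKeys (l ++ [p]) = ccKeys l := by rw [hkeys]; simp [hu]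
      refine Prod.ext ?_ (Prod.ext ?_ ?_)
      · dsimp only
        rw [hk]
        congr 1
        refine List.map_congr_left (fun c hc => ?_)
        have hne : c ≠ '_' := ((mem_ccLetters _ _).mp hc).2
        rw [List.map_append, List.count_append]
        simp [hu, Ne.symm hne]
      · dsimp only
        rw [hk]
        congr 1
        refine List.map_congr_left (fun c hc => ?_)
        have hne : c ≠ '_' := ((mem_ccLetters _ _).mp hc).2
        rw [List.filter_append]
        have : List.filter (fun q => q.2 == c) [p] = [] := by
          simp [hu, Ne.symm hne]
        simp [this]
      · dsimp only
        simp [hu]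
    · -- a letter
      have hcont1 := contains_mk_map (α := Int) (ccKeys l)
        (fun c => ((l.map (·.2)).count c : Int)) p.2
      have hcont2 := contains_mk_map (α := List Int) (ccKeys l)
        (fun c => (l.filter (fun q => q.2 == c)).map (·.1)) p.2
      by_cases hmem : p.2 ∈ ccKeys l
      · -- seen before: in-place update of both dicts
        have hk : ccKeys (l ++ [p]) = ccKeys l := by
          rw [hkeys]; simp [hmem]
        have hstep : computeCountStepA
            (PySem.Dict.mk ((ccKeys l).map (fun c => (ccS c, ((l.map (·.2)).count c : Int)))),
             PySem.Dict.mk ((ccKeys l).map (fun c => (ccS c, (l.filter (fun p => p.2 == c)).map (·.1)))),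
             l.any (fun p => p.2 == '_')) p =
            ((PySem.Dict.mk ((ccKeys l).map (fun c => (ccS c, ((l.map (·.2)).count c : Int))))).insert
               (ccS p.2) (((l.map (·.2)).count p.2 : Int) + 1),
             (PySem.Dict.mk ((ccKeys l).map (fun c => (ccS c, (l.filter (fun q => q.2 == c)).map (·.1))))).insert
               (ccS p.2) ((l.filter (fun q => q.2 == p.2)).map (·.1) ++ [p.1]),
             l.any (fun p => p.2 == '_')) := by
          simp only [computeCountStepA, hu, beq_iff_eq, if_false]
          rw [getD_mk_map _ hnd _ _ hmem, getD_mk_map _ hnd _ _ hmem]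
        rw [hstep]
        refine Prod.ext ?_ (Prod.ext ?_ ?_)
        · dsimp only
          apply PySem.Dict.ext_iff.mpr
          rw [PySem.Dict.items_insert_of_contains _ _ (by rw [hcont1]; simp [hmem])]
          show _ = ((ccKeys (l ++ [p])).map _)
          rw [hk, List.map_map]
          refine List.map_congr_left (fun c hc => ?_)
          simp only [Function.comp]
          by_cases hce : c = p.2
          · subst hce
            simp only [beq_self_eq_true, if_true, List.map_append, List.count_append]
            simp
          · have hbe : (ccS c == ccS p.2) = false := by
              simp only [beq_eq_false_iff_ne, ne_eq]
              exact fun h => hce (ccS_inj h)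
            simp only [hbe, Bool.false_eq_true, if_false, List.map_append, List.count_append]
            simp [Ne.symm hce]
        · dsimp only
          apply PySem.Dict.ext_iff.mpr
          rw [PySem.Dict.items_insert_of_contains _ _ (by rw [hcont2]; simp [hmem])]
          show _ = ((ccKeys (l ++ [p])).map _)
          rw [hk, List.map_map]
          refine List.map_congr_left (fun c hc => ?_)
          simp only [Function.comp]
          by_cases hce : c = p.2
          · subst hce
            simp only [beq_self_eq_true, if_true, List.filter_append]
            simp
          · have hbe : (ccS c == ccS p.2) = false := by
              simp only [beq_eq_false_iff_ne, ne_eq]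
              exact fun h => hce (ccS_inj h)
            simp only [hbe, Bool.false_eq_true, if_false, List.filter_append]
            have : List.filter (fun q => q.2 == c) [p] = [] := by simp [Ne.symm hce]
            simp [this]
        · dsimp only
          simp [hu]
      · -- fresh letter: both dicts get a new last entry
        have hnotin : p.2 ∉ l.map (·.2) := fun h =>
          hmem ((mem_ccLetters _ _).mpr ⟨h, hu⟩)
        have hk : ccKeys (l ++ [p]) = ccKeys l ++ [p.2] := by
          rw [hkeys]; simp [hmem, hu]
        have hgd1 : (PySem.Dict.mk ((ccKeys l).map (fun c =>
            (ccS c, ((l.map (·.2)).count c : Int))))).getD (ccS p.2) 0 = 0 :=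
          PySem.Dict.getD_of_not_contains _ _ (by rw [hcont1]; simp [hmem])
        have hgd2 : (PySem.Dict.mk ((ccKeys l).map (fun c =>
            (ccS c, (l.filter (fun q => q.2 == c)).map (·.1))))).getD (ccS p.2) [] = [] :=
          PySem.Dict.getD_of_not_contains _ _ (by rw [hcont2]; simp [hmem])
        have hstep : computeCountStepA
            (PySem.Dict.mk ((ccKeys l).map (fun c => (ccS c, ((l.map (·.2)).count c : Int)))),
             PySem.Dict.mk ((ccKeys l).map (fun c => (ccS c, (l.filter (fun p => p.2 == c)).map (·.1)))),
             l.any (fun p => p.2 == '_')) p =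
            ((PySem.Dict.mk ((ccKeys l).map (fun c => (ccS c, ((l.map (·.2)).count c : Int))))).insert
               (ccS p.2) ((0 : Int) + 1),
             (PySem.Dict.mk ((ccKeys l).map (fun c => (ccS c, (l.filter (fun q => q.2 == c)).map (·.1))))).insert
               (ccS p.2) (([] : List Int) ++ [p.1]),
             l.any (fun p => p.2 == '_')) := by
          simp only [computeCountStepA, hu, beq_iff_eq, if_false]
          rw [hgd1, hgd2]
        rw [hstep]
        refine Prod.ext ?_ (Prod.ext ?_ ?_)
        · dsimp only
          apply PySem.Dict.ext_iff.mpr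
          rw [PySem.Dict.items_insert_of_not_contains _ _ (by rw [hcont1]; simp [hmem])]
          show _ = ((ccKeys (l ++ [p])).map _)
          rw [hk, List.map_append]
          congr 1
          · refine List.map_congr_left (fun c hc => ?_)
            have hce : c ≠ p.2 := fun h => hmem (h ▸ hc)
            rw [List.map_append, List.count_append]
            simp [Ne.symm hce]
          · have hz : (l.map (·.2)).count p.2 = 0 := List.count_eq_zero.mpr hnotin
            simp only [List.map_cons, List.map_nil, List.map_append, List.count_append, hz]
            simp
        · dsimp only
          apply PySem.Dict.ext_iff.mpr
          rw [PySem.Dict.items_insert_of_not_contains _ _ (by rw [hcont2]; simp [hmem])]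
          show _ = ((ccKeys (l ++ [p])).map _)
          rw [hk, List.map_append]
          congr 1
          · refine List.map_congr_left (fun c hc => ?_)
            have hce : c ≠ p.2 := fun h => hmem (h ▸ hc)
            rw [List.filter_append]
            have : List.filter (fun q => q.2 == c) [p] = [] := by simp [Ne.symm hce]
            simp [this]
          · have hz : l.filter (fun q => q.2 == p.2) = [] := by
              rw [List.filter_eq_nil_iff]
              intro q hq hbeq
              exact hnotin (List.mem_map.mpr ⟨q, hq, by simpa using hbeq⟩)
            simp [List.filter_append, hz]
        · dsimp only
          simp [hu]

theorem pv_isIn_singleton (l : List Char) (c : Char) :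
    PySem.Chars.isIn [c] l = l.any (· == c) := by
  rw [Bool.eq_iff_iff]
  simp only [PySem.Chars.isIn_iff_infix, List.singleton_infix_iff, List.any_eq_true, beq_iff_eq]
  constructor
  · intro h; exact ⟨c, h, rfl⟩
  · rintro ⟨x, hx, rfl⟩; exact hx

theorem pv_any_snd_enumerate (xs : List Char) (s : Int) (c : Char) :
    ((PySem.List.enumerate xs s).any fun p => p.2 == c) = xs.any (· == c) := by
  induction xs generalizing s with
  | nil => rfl
  | cons x t ih => simp [PySem.List.enumerate_cons, ih]

-- ===== VERDICT (by name: the statement is the Claim_ definition above) =====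
theorem compute_count_spec : Claim_equal_compute_count := by
  intro b _
  unfold Spec_compute_count compute_count compute_count_alt
  rw [ccA_inv]
  dsimp only
  have hsnd : (PySem.List.enumerate b.toList 0).map (·.2) = b.toList :=
    PySem.List.map_snd_enumerate ..
  have hnodupS : ((ccLetters b.toList).map ccS).Nodup :=
    (nodup_ccLetters b.toList).map (fun _ _ => ccS_inj)
  rw [PySem.Dict.items_foldl_insert_fresh _ _ _ _ (by intro a _; simp) hnodupS,
      PySem.Dict.items_foldl_insert_fresh _ _ _ _ (by intro a _; simp) hnodupS]
  refine Prod.ext ?_ (Prod.ext ?_ ?_)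
  · dsimp only
    rw [ccKeys, hsnd]
    rw [show (PySem.Dict.empty : PySem.Dict String Int).items = [] from rfl, List.nil_append]
    refine List.map_congr_left (fun c _ => ?_)
    rw [PySem.List.foldl_beq_add_one]
    simp
  · dsimp only
    rw [ccKeys, hsnd]
    simp [PySem.Dict.empty]
  · dsimp only
    rw [pv_any_snd_enumerate, PySem.Str.isIn_eq]
    show _ = PySem.Chars.isIn "_".toList b.toList
    rw [show ("_".toList) = ['_'] from rfl, pv_isIn_singleton]
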